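-- pv_equiv track=rewrite | github.com/s-surineni/atice | leet_code/count_substrings_that_differ_by_one.py | count_sub_strs
-- ===== SOURCE A (Python) =====
-- def count_sub_strs(str1, str2):
--     res = 0
--     for i in range(len(str1)):
--         for j in range(len(str2)):
--             miss, pos = 0, 0
--             while i + pos < len(str1) and j + pos < len(str2) and miss < 1:
--                 miss += str1[i + pos] != str2[j + pos]
--                 res += miss == 1
--                 pos += 1
--     return res
-- ===== SOURCE B (Python) =====
-- def count_sub_strs(str1, str2):
--     m = len(str2)
--     nxt = [False] * m
--     res = 0
--     for i in range(len(str1) - 1, -1, -1):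
--         a = str1[i]
--         cur = [False] * m
--         for j in range(m - 1, -1, -1):
--             d = a != str2[j] or (j + 1 < m and nxt[j + 1])
--             cur[j] = d
--             res += d
--         nxt = cur
--     return res
-- ===== Notes on version B (the rewrite author's own statement) =====
-- stated objective: faster
-- what changed: A rescans a diagonal from every start pair (per-pair while loop); B computes a has-mismatch-on-diagonal suffix DP row by row (cur[j] = str1[i]!=str2[j] or nxt[j+1]) and sums the table in one pass per cell.
import Mathlib
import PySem

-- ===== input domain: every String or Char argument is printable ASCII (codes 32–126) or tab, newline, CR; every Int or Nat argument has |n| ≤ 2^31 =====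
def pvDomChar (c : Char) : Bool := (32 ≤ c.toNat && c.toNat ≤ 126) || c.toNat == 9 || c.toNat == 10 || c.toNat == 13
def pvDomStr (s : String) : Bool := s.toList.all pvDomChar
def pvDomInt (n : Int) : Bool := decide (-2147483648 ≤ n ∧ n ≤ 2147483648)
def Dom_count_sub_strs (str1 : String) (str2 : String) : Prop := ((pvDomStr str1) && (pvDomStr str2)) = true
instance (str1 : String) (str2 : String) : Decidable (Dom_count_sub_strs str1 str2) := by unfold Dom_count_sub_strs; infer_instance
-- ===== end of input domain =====

-- B replaces A's per-start-pair diagonal rescans with a suffix DP table summed cell by cell (objective: faster).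

-- ===== PORT A =====
-- inner while loop of A: state (miss, res), advancing pos = consuming the two suffixes
def innerA : List Char → List Char → Int → Int → Int
  | a :: as, b :: bs, miss, res =>
      if miss < 1 then
        let miss' := miss + (if a ≠ b then 1 else 0)
        innerA as bs miss' (res + (if miss' = 1 then 1 else 0))
      else res
  | _, _, _, res => res

def count_sub_strs (str1 : String) (str2 : String) : Int :=
  let c1 := str1.toList
  let c2 := str2.toList
  (List.range c1.length).foldl (fun res i =>
    (List.range c2.length).foldl (fun res j =>
      innerA (c1.drop i) (c2.drop j) 0 res) res) 0

-- ===== PORT B =====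
-- inner loop of B: builds row i right-to-left from row i+1 (nxt), returning (cur, its sum)
def buildRow (a : Char) : List Char → List Bool → List Bool × Int
  | [], _ => ([], 0)
  | b :: bs, nxt =>
      let p := buildRow a bs nxt.tail
      let d := decide (a ≠ b) || nxt.tail.headD false
      (d :: p.1, p.2 + (if d then 1 else 0))

def count_sub_strs_alt (str1 : String) (str2 : String) : Int :=
  let c2 := str2.toList
  (str1.toList.foldr (fun a acc =>
      let r := buildRow a c2 acc.1
      (r.1, acc.2 + r.2))
    (List.replicate c2.length false, 0)).2

-- ===== PRECONDITION & SPEC =====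
def Spec_count_sub_strs (str1 : String) (str2 : String) (out : Int) : Prop := out = count_sub_strs_alt str1 str2
instance (str1 : String) (str2 : String) (out : Int) : Decidable (Spec_count_sub_strs str1 str2 out) := by unfold Spec_count_sub_strs; infer_instance

-- ===== CLAIM (what is proved, stated in full; the proofs are below) =====
def Claim_equal_count_sub_strs : Prop := ∀ (str1 : String) (str2 : String), Dom_count_sub_strs str1 str2 → Spec_count_sub_strs str1 str2 (count_sub_strs str1 str2)

-- ===== LEMMAS AND PROOFS =====

-- "some mismatch on the diagonal starting at these two suffixes"
def hasMiss : List Char → List Char → Bool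
  | a :: as, b :: bs => (decide (a ≠ b)) || hasMiss as bs
  | _, _ => false

def ind (l1 l2 : List Char) : Int := if hasMiss l1 l2 then 1 else 0

def suffSum (f : List Char → Int) : List Char → Int
  | [] => 0
  | a :: as => f (a :: as) + suffSum f as

def rowSpec (l1 : List Char) : List Char → List Bool
  | [] => []
  | b :: bs => hasMiss l1 (b :: bs) :: rowSpec l1 bs

lemma hasMiss_nil_right (l : List Char) : hasMiss l [] = false := by
  cases l <;> simp [hasMiss]

lemma innerA_stop (l1 l2 : List Char) (res : Int) : innerA l1 l2 1 res = res := by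
  cases l1 <;> cases l2 <;> simp [innerA]

lemma innerA_zero (l1 : List Char) : ∀ l2 res, innerA l1 l2 0 res = res + ind l1 l2 := by
  induction l1 with
  | nil => intro l2 res; cases l2 <;> simp [innerA, ind, hasMiss]
  | cons a as ih =>
    intro l2 res
    cases l2 with
    | nil => simp [innerA, ind, hasMiss_nil_right]
    | cons b bs =>
      by_cases h : a = b
      · simp [innerA, h, ih, ind, hasMiss]
      · simp [innerA, h, innerA_stop, ind, hasMiss]

lemma foldl_add_sum {α : Type} (f : α → Int) (l : List α) : ∀ res : Int,
    List.foldl (fun r x => r + f x) res l = res + (l.map f).sum := by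
  induction l with
  | nil => intro res; simp
  | cons a as ih => intro res; simp [List.foldl, ih, add_assoc]

lemma range_drop_sum (f : List Char → Int) : ∀ l : List Char,
    ((List.range l.length).map (fun i => f (l.drop i))).sum = suffSum f l := by
  intro l
  induction l with
  | nil => simp [suffSum]
  | cons a as ih =>
    simp only [List.length_cons, List.range_succ_eq_map, List.map_cons, List.map_map,
      List.sum_cons, List.drop_zero]
    rw [suffSum]
    exact congrArg _ ih

lemma rowSpec_headD (l1 l2 : List Char) : (rowSpec l1 l2).headD false = hasMiss l1 l2 := by
  cases l2 with
  | nil => simp [rowSpec, hasMiss_nil_right]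
  | cons b bs => simp [rowSpec]

lemma rowSpec_nil (l2 : List Char) : rowSpec [] l2 = List.replicate l2.length false := by
  induction l2 with
  | nil => simp [rowSpec]
  | cons b bs ih => simp [rowSpec, hasMiss, ih, List.replicate]

lemma rowSpec_sum_eq (l1 : List Char) : ∀ l2 : List Char,
    ((rowSpec l1 l2).map (fun d => if d then (1 : Int) else 0)).sum = suffSum (ind l1) l2 := by
  intro l2
  induction l2 with
  | nil => simp [rowSpec, suffSum]
  | cons b bs ih => simp [rowSpec, suffSum, ind, ih]

lemma buildRow_spec (a : Char) (as : List Char) : ∀ l2 : List Char,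
    buildRow a l2 (rowSpec as l2)
      = (rowSpec (a :: as) l2,
         ((rowSpec (a :: as) l2).map (fun d => if d then (1 : Int) else 0)).sum) := by
  intro l2
  induction l2 with
  | nil => simp [buildRow, rowSpec]
  | cons b bs ih =>
    have htail : (rowSpec as (b :: bs)).tail = rowSpec as bs := by simp [rowSpec]
    have h3 : (rowSpec as bs).head?.getD false = hasMiss as bs := by
      have := rowSpec_headD as bs; simpa [List.headD_eq_head?_getD] using this
    rw [show rowSpec (a :: as) (b :: bs)
        = hasMiss (a :: as) (b :: bs) :: rowSpec (a :: as) bs from rfl]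
    simp [buildRow, htail, ih, h3, hasMiss, add_comm]

lemma foldr_spec (c2 : List Char) : ∀ c1 : List Char,
    c1.foldr (fun a acc =>
        let r := buildRow a c2 acc.1
        (r.1, acc.2 + r.2))
      (List.replicate c2.length false, 0)
    = (rowSpec c1 c2, suffSum (fun l1 => suffSum (ind l1) c2) c1) := by
  intro c1
  induction c1 with
  | nil => simp [suffSum, rowSpec_nil]
  | cons a as ih =>
    simp only [List.foldr, ih, buildRow_spec, rowSpec_sum_eq, suffSum]
    exact Prod.ext rfl (by ring)

lemma main_eq (c1 c2 : List Char) :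
    (List.range c1.length).foldl (fun res i =>
      (List.range c2.length).foldl (fun res j =>
        innerA (c1.drop i) (c2.drop j) 0 res) res) 0
    = (c1.foldr (fun a acc =>
        let r := buildRow a c2 acc.1
        (r.1, acc.2 + r.2))
      (List.replicate c2.length false, 0)).2 := by
  rw [foldr_spec]
  have hinner : ∀ (l1 : List Char) (res : Int),
      (List.range c2.length).foldl
        (fun res j => innerA l1 (c2.drop j) 0 res) res
      = res + suffSum (ind l1) c2 := by
    intro l1 res
    have h : (fun (res : Int) j => innerA l1 (c2.drop j) 0 res)
        = fun res j => res + (fun l2 => ind l1 l2) (c2.drop j) := by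
      funext res j; exact innerA_zero l1 _ res
    rw [h, foldl_add_sum, range_drop_sum]
  have houter : (fun (res : Int) i =>
      (List.range c2.length).foldl
        (fun res j => innerA (c1.drop i) (c2.drop j) 0 res) res)
      = fun res i => res + (fun l1 => suffSum (ind l1) c2) (c1.drop i) := by
    funext res i; exact hinner _ res
  rw [houter, foldl_add_sum]
  simpa using range_drop_sum (fun l1 => suffSum (ind l1) c2) c1

-- ===== VERDICT (by name: the statement is the Claim_ definition above) =====
theorem count_sub_strs_spec : Claim_equal_count_sub_strs := by
  intro str1 str2 _
  show count_sub_strs str1 str2 = count_sub_strs_alt str1 str2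
  exact main_eq str1.toList str2.toList
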